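-- pv_equiv track=rewrite | github.com/goodlucky1215/algorithm | 8.파이썬 알고리즘 인터뷰/programmers/후보키.py | find_mini
-- ===== SOURCE A (Python) =====
-- def find_key(box,n) : #시작점, n은 갯수
--     if n==0:
--         return [[]]
--     s = []
--     for i in range(len(box)):
--         for j in find_key(box[i+1:],n-1):
--             s.append([box[i]]+j)
--     return s
--
-- def find_mini(col,answer) : #컬럼번호, 컬럼set
--     s = []
--     for i in range(1,len(col)+1):
--         s=find_key(col,i)
--         for j in s:
--             if tuple(j) in answer:
--                 return False
--     return True
-- ===== SOURCE B (Python) =====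
-- def find_mini(col, answer):
--     # Instead of enumerating all 2^n column subsets, test each candidate key in
--     # `answer` directly as a subsequence of `col` (greedy two-pointer scan).
--     for t in answer:
--         if not t:
--             continue
--         i = 0
--         for x in col:
--             if i < len(t) and x == t[i]:
--                 i += 1
--         if i == len(t):
--             return False
--     return True
-- ===== Notes on version B (the rewrite author's own statement) =====
-- stated objective: faster
-- what changed: B iterates over the answer set and tests each tuple as a subsequence of col with a greedy two-pointer scan, instead of enumerating every subset of col of every size and looking each one up in answer.
import Mathlib
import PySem

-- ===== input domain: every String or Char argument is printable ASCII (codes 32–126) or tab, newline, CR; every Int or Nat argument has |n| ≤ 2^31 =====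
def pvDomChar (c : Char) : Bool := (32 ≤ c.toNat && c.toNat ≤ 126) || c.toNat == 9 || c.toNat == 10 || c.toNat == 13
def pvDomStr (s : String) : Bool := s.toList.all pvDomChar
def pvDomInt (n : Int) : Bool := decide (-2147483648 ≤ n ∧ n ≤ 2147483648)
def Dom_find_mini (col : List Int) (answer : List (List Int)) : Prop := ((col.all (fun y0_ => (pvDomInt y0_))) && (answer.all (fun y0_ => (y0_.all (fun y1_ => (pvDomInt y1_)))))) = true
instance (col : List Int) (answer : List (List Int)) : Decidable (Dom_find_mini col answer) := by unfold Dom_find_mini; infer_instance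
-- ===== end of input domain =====

-- B replaces A's enumeration of all subsets of col by a direct subsequence test of each
-- answer tuple against col (objective: faster, asymptotic).

-- ===== PORT A =====
-- find_key(box, n): the loop 'for i in range(len(box))' walks the suffixes of box;
-- find_key_loop carries the accumulator s exactly as Python's list s.
mutual
def find_key (box : List Int) (n : Int) : List (List Int) :=
  if n = 0 then [[]]
  else find_key_loop n [] box
termination_by (box.length, 1)

def find_key_loop (n : Int) (s : List (List Int)) (box : List Int) : List (List Int) :=
  match box with
  | [] => s
  | b :: rest => find_key_loop n (s ++ (find_key rest (n - 1)).map (fun j => b :: j)) rest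
termination_by (box.length, 0)
end

-- inner 'for j in s: if tuple(j) in answer: return False' (some false = early return)
def find_mini_scan (answer : List (List Int)) : List (List Int) → Option Bool
  | [] => none
  | j :: rest => if j ∈ answer then some false else find_mini_scan answer rest

-- outer 'for i in range(1, len(col)+1)'
def find_mini_go (col : List Int) (answer : List (List Int)) : List Int → Bool
  | [] => true
  | i :: rest =>
    match find_mini_scan answer (find_key col i) with
    | some b => b
    | none => find_mini_go col answer rest

def find_mini (col : List Int) (answer : List (List Int)) : Bool :=
  find_mini_go col answer (PySem.List.pyRange 1 (col.length + 1) 1)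

-- ===== PORT B =====
-- greedy pointer i over t: 'for x in col: if i < len(t) and x == t[i]: i += 1'
def bMatchStep (t : List Int) (i : Nat) (x : Int) : Nat :=
  if i < t.length ∧ t.getD i 0 = x then i + 1 else i

def isSubseqOf (t col : List Int) : Bool :=
  decide (col.foldl (bMatchStep t) 0 = t.length)

-- 'for t in answer: if not t: continue; …; if i == len(t): return False'
def find_mini_alt_go (col : List Int) : List (List Int) → Bool
  | [] => true
  | t :: rest =>
    if t ≠ [] ∧ isSubseqOf t col = true then false else find_mini_alt_go col rest

def find_mini_alt (col : List Int) (answer : List (List Int)) : Bool :=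
  find_mini_alt_go col answer

-- ===== PRECONDITION & SPEC =====
def Spec_find_mini (col : List Int) (answer : List (List Int)) (out : Bool) : Prop := out = find_mini_alt col answer
instance (col : List Int) (answer : List (List Int)) (out : Bool) : Decidable (Spec_find_mini col answer out) := by unfold Spec_find_mini; infer_instance

-- ===== CLAIM (what is proved, stated in full; the proofs are below) =====
def Claim_equal_find_mini : Prop := ∀ (col : List Int) (answer : List (List Int)), Dom_find_mini col answer → Spec_find_mini col answer (find_mini col answer)

-- ===== LEMMAS AND PROOFS =====

-- the loop accumulator factors out
theorem find_key_loop_acc (n : Int) (s : List (List Int)) (box : List Int) :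
    find_key_loop n s box = s ++ find_key_loop n [] box := by
  induction box generalizing s with
  | nil => simp [find_key_loop]
  | cons b rest ih =>
    rw [find_key_loop, find_key_loop]
    rw [ih (s ++ (find_key rest (n - 1)).map (fun j => b :: j)),
        ih ([] ++ (find_key rest (n - 1)).map (fun j => b :: j))]
    simp

-- characterization: members of find_key box k are exactly the length-k sublists of box
theorem mem_find_key (box : List Int) (k : Nat) (j : List Int) :
    j ∈ find_key box (k : Int) ↔ (j.length = k ∧ j.Sublist box) := by
  induction box generalizing k j with
  | nil =>
    cases k with
    | zero => simp [find_key]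
    | succ k =>
      have hne : ((k + 1 : Nat) : Int) ≠ 0 := by exact_mod_cast Nat.succ_ne_zero k
      rw [find_key, if_neg hne, find_key_loop]
      simp only [List.not_mem_nil, false_iff, not_and]
      intro hl hs
      rw [List.sublist_nil] at hs
      subst hs
      simp at hl
  | cons b rest ih =>
    cases k with
    | zero =>
      constructor
      · intro h
        simp [find_key] at h
        subst h
        exact ⟨rfl, List.nil_sublist _⟩
      · rintro ⟨hl, _⟩
        simp [find_key]
        exact List.eq_nil_of_length_eq_zero hl
    | succ k =>
      have hne : ((k + 1 : Nat) : Int) ≠ 0 := by exact_mod_cast Nat.succ_ne_zero k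
      rw [find_key, if_neg hne, find_key_loop, find_key_loop_acc]
      have h1 : ((k + 1 : Nat) : Int) - 1 = (k : Int) := by push_cast; ring
      rw [h1]
      have h2 : find_key_loop ((k + 1 : Nat) : Int) [] rest
          = find_key rest ((k + 1 : Nat) : Int) := by
        rw [find_key, if_neg hne]
      rw [h2]
      simp only [List.nil_append, List.mem_append, List.mem_map]
      constructor
      · rintro (⟨j', hj', rfl⟩ | h)
        · rcases (ih k j').1 hj' with ⟨hl, hs⟩
          exact ⟨by simp [hl], List.cons_sublist_cons.2 hs⟩
        · rcases (ih (k + 1) j).1 h with ⟨hl, hs⟩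
          exact ⟨hl, hs.trans (List.sublist_cons_self b rest)⟩
      · rintro ⟨hl, hs⟩
        rcases List.sublist_cons_iff.1 hs with h | ⟨r, rfl, hr⟩
        · exact Or.inr ((ih (k + 1) j).2 ⟨hl, h⟩)
        · exact Or.inl ⟨r, (ih k r).2 ⟨by simpa using hl, hr⟩, rfl⟩

theorem scan_none (answer s : List (List Int)) :
    find_mini_scan answer s = none ↔ ∀ j ∈ s, j ∉ answer := by
  induction s with
  | nil => simp [find_mini_scan]
  | cons j rest ih =>
    by_cases hj : j ∈ answer <;> simp [find_mini_scan, hj, ih]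

theorem scan_some (answer s : List (List Int)) (b : Bool) :
    find_mini_scan answer s = some b → b = false := by
  induction s with
  | nil => simp [find_mini_scan]
  | cons j rest ih =>
    rw [find_mini_scan]
    by_cases hj : j ∈ answer
    · rw [if_pos hj]
      intro h
      injection h with h
      exact h.symm
    · rw [if_neg hj]
      exact ih

theorem go_true_iff (col : List Int) (answer : List (List Int)) (is : List Int) :
    find_mini_go col answer is = true
      ↔ ∀ i ∈ is, ∀ j ∈ find_key col i, j ∉ answer := by
  induction is with
  | nil => simp [find_mini_go]
  | cons i rest ih =>
    rw [find_mini_go]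
    rcases hscan : find_mini_scan answer (find_key col i) with _ | b
    · have hnone := (scan_none answer _).1 hscan
      rw [ih]
      constructor
      · rintro h i' hi' j hj
        rcases List.mem_cons.1 hi' with rfl | hi'
        · exact hnone j hj
        · exact h i' hi' j hj
      · intro h i' hi'
        exact h i' (List.mem_cons_of_mem _ hi')
    · have hb := scan_some answer _ b hscan
      subst hb
      simp only [Bool.false_eq_true, false_iff]
      intro h
      have : find_mini_scan answer (find_key col i) = none := by
        exact (scan_none answer _).2 (h i (by simp))
      simp [this] at hscan

-- A returns true iff no nonempty sublist of col is in answer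
theorem find_mini_true_iff (col : List Int) (answer : List (List Int)) :
    find_mini col answer = true ↔ ∀ t ∈ answer, ¬(t ≠ [] ∧ t.Sublist col) := by
  rw [find_mini, go_true_iff]
  constructor
  · intro h t ht ⟨hne, hs⟩
    have hlen : 1 ≤ t.length := by
      cases t with | nil => exact absurd rfl hne | cons a l => simp
    have hle : t.length ≤ col.length := hs.length_le
    have hi : (t.length : Int) ∈ PySem.List.pyRange 1 (col.length + 1) 1 := by
      rw [PySem.List.mem_pyRange_one]
      omega
    exact h _ hi t ((mem_find_key col t.length t).2 ⟨rfl, hs⟩) ht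
  · intro h i hi j hj hja
    rw [PySem.List.mem_pyRange_one] at hi
    obtain ⟨k, rfl⟩ : ∃ k : Nat, i = (k : Int) := ⟨i.toNat, by omega⟩
    rcases (mem_find_key col k j).1 hj with ⟨hl, hs⟩
    refine h j hja ⟨?_, hs⟩
    intro hnil
    subst hnil
    simp at hl
    omega

-- greedy two-pointer invariant
theorem foldl_bMatchStep (t : List Int) (col : List Int) (i : Nat) (hi : i ≤ t.length) :
    col.foldl (bMatchStep t) i = t.length ↔ (t.drop i).Sublist col := by
  induction col generalizing i with
  | nil =>
    simp only [List.foldl_nil, List.sublist_nil, List.drop_eq_nil_iff]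
    omega
  | cons x col' ih =>
    rw [List.foldl_cons]
    by_cases hlt : i < t.length
    · have hdrop : t.drop i = t[i] :: t.drop (i + 1) := List.drop_eq_getElem_cons hlt
      by_cases heq : t.getD i 0 = x
      · rw [bMatchStep, if_pos ⟨hlt, heq⟩, ih (i + 1) (by omega), hdrop]
        have : t[i] = x := by rwa [List.getD_eq_getElem t 0 hlt] at heq
        rw [this, List.cons_sublist_cons]
      · rw [bMatchStep, if_neg (by tauto), ih i hi, hdrop]
        constructor
        · exact fun hs => hs.trans (List.sublist_cons_self x col')
        · intro hs
          rcases List.sublist_cons_iff.1 hs with h | ⟨r, hr, hrs⟩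
          · exact h
          · exfalso
            rw [List.getD_eq_getElem t 0 hlt] at heq
            exact heq (List.cons.injEq .. ▸ hr).1
    · have hi' : i = t.length := by omega
      subst hi'
      rw [bMatchStep, if_neg (by omega)]
      rw [ih t.length le_rfl]
      simp
    
theorem isSubseqOf_iff (t col : List Int) :
    isSubseqOf t col = true ↔ t.Sublist col := by
  rw [isSubseqOf, decide_eq_true_iff, foldl_bMatchStep t col 0 (Nat.zero_le _)]
  simp

-- B returns true iff no nonempty element of answer is a sublist of col
theorem find_mini_alt_true_iff (col : List Int) (answer : List (List Int)) :
    find_mini_alt col answer = true ↔ ∀ t ∈ answer, ¬(t ≠ [] ∧ t.Sublist col) := by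
  rw [find_mini_alt]
  induction answer with
  | nil => simp [find_mini_alt_go]
  | cons t rest ih =>
    rw [find_mini_alt_go]
    by_cases h : t ≠ [] ∧ isSubseqOf t col = true
    · rw [if_pos h]
      simp only [Bool.false_eq_true, false_iff]
      intro hall
      exact hall t (by simp) ⟨h.1, (isSubseqOf_iff t col).1 h.2⟩
    · rw [if_neg h, ih]
      rw [not_and_or] at h
      constructor
      · intro hall t' ht' 
        rcases List.mem_cons.1 ht' with rfl | hmem
        · rintro ⟨hne, hs⟩
          rcases h with h | h
          · exact h hne
          · exact h ((isSubseqOf_iff t' col).2 hs)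
        · exact hall t' hmem
      · intro hall t' ht' ; exact hall t' (List.mem_cons_of_mem _ ht')

-- ===== VERDICT (by name: the statement is the Claim_ definition above) =====
theorem find_mini_spec : Claim_equal_find_mini := by
  intro col answer _
  unfold Spec_find_mini
  have h : find_mini col answer = true ↔ find_mini_alt col answer = true := by
    rw [find_mini_true_iff, find_mini_alt_true_iff]
  cases hA' : find_mini col answer <;> cases hB' : find_mini_alt col answer <;> simp_all
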